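-- pv_equiv track=rewrite | github.com/ctd2121/boston_public_transportation | location_distances.py | station_popularities
-- ===== SOURCE A (Python) =====
-- def station_popularities(zip_closest_station, zip_pop):
--     '''
--     Computes the popularity of all subway stations, based on the populations of surrounding neighborhoods.
--     This function "reverses" the zip_closest_station dictionary; that is, values become keys and keys become values,
--     ensuring that no duplicates are produced.
--     Args:
--         zip_closest_station: a dictionary with zip code keys and station values
--         zip_pop: a dictionary with zip code keys and population values
--     Returns:
--         unique_stations: an array containing all the unique MBTA stations for which the sum of populations of
--         its corresponding zip code neighborhoods is greater than zero
--         station_popularity: a dictionary with station keys and the sum of the populations of all zip codes to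
--         which this station is closest
--     '''
--     # Initialize station_popularity dictionary
--     station_popularity = {}
--     # Initialize array that consists of all unique MBTA stations
--     unique_stations = []
--
--     # For all zip codes in zip_closest_station dictionary
--     for zip_code in zip_closest_station:
--         # Retrieve the MBTA station that this zip code neighborhood is closest to
--         station = zip_closest_station[zip_code]
--         # If the station is not already a key in the station_popularity dictionary
--         if station not in station_popularity:
--             # Add it as a key with a value equal to the population of the zip code neighborhood
--             station_popularity[station] = zip_pop[zip_code]
--             # Append station name to unique_stations array
--             unique_stations.append(station)
--         else: # If the station is already a key in the station_popularity dictionary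
--             # Increment the dictionary value by the population of the zip code neighborhood
--             station_popularity[station] = station_popularity[station] + zip_pop[zip_code]
--
--     return unique_stations, station_popularity
-- ===== SOURCE B (Python) =====
-- def station_popularities(zip_closest_station, zip_pop):
--     # Staged passes: materialise (station, population) pairs, dedup the stations,
--     # then compute each station's total by a grouped sum over the pairs.
--     pairs = [(station, zip_pop[z]) for z, station in zip_closest_station.items()]
--     unique_stations = list(dict.fromkeys(s for s, _ in pairs))
--     station_popularity = {s: sum(p for t, p in pairs if t == s) for s in unique_stations}
--     return unique_stations, station_popularity
-- ===== Notes on version B (the rewrite author's own statement) =====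
-- stated objective: alternative
-- what changed: Replaces A's single pass with a membership branch and two accumulators by staged passes: build (station, population) pairs, dedup stations with dict.fromkeys, then compute each station's total by a grouped sum over the pairs (O(n*m) nested scan instead of O(n) incremental updates).
import Mathlib
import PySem

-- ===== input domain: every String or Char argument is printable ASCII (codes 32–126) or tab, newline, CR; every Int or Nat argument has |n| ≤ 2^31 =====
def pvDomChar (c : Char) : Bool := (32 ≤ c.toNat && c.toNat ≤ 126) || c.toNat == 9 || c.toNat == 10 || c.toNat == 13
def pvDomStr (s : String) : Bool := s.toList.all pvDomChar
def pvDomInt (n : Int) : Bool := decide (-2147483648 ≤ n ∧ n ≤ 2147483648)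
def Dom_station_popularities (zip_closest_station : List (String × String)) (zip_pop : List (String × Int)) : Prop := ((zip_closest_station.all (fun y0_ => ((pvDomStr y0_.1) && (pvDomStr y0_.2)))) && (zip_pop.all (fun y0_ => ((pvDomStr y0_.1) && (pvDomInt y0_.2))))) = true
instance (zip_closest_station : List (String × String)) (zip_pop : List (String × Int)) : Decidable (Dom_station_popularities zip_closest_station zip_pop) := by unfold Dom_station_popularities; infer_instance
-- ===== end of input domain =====

-- B replaces A's single-pass branch-and-two-accumulators loop with staged passes:
-- build (station, population) pairs, dedup the stations, then a grouped sum per station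
-- (alternative decomposition; not faster).


-- ===== PORT A =====
-- Literal port of A: iterate the zip→station dict (its items: keys are unique, so the
-- per-key lookup zip_closest_station[zip_code] is the paired value); branch on membership
-- of station_popularity, keeping a separate unique_stations list. zip_pop lookups are getD
-- (Pre_ guarantees the key is present, so the default is never the value Python raises on).
def station_popularities (zip_closest_station : List (String × String)) (zip_pop : List (String × Int)) : List String × (List (String × Int)) :=
  let zd := PySem.Dict.mk zip_closest_station
  let zpd := PySem.Dict.mk zip_pop
  let st := zd.items.foldl
    (fun (acc : PySem.Dict String Int × List String) p =>
      let station := p.2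
      if acc.1.contains station = false then
        (acc.1.insert station (zpd.getD p.1 0), acc.2 ++ [station])
      else
        (acc.1.insert station (acc.1.getD station 0 + zpd.getD p.1 0), acc.2))
    (PySem.Dict.empty, [])
  (st.2, st.1.items)

-- ===== PORT B =====
-- Port of B: pairs = [(station, zip_pop[z]) for z, station in items()]; dedup the stations
-- (dict.fromkeys = PySem.List.dedup); then a grouped sum over pairs per unique station.
def station_popularities_alt (zip_closest_station : List (String × String)) (zip_pop : List (String × Int)) : List String × (List (String × Int)) :=
  let zpd := PySem.Dict.mk zip_pop
  let pairs := (PySem.Dict.mk zip_closest_station).items.map (fun q => (q.2, zpd.getD q.1 0))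
  let unique := PySem.List.dedup (pairs.map Prod.fst)
  (unique, unique.map (fun s => (s, ((pairs.filter (fun t => t.1 == s)).map Prod.snd).sum)))

-- ===== PRECONDITION & SPEC =====
-- Pre_ excludes exactly the inputs on which A raises KeyError: a zip code of
-- zip_closest_station that is missing from zip_pop.
def Pre_station_popularities (zip_closest_station : List (String × String)) (zip_pop : List (String × Int)) : Prop :=
  ∀ p ∈ zip_closest_station, p.1 ∈ zip_pop.map Prod.fst
instance (zip_closest_station : List (String × String)) (zip_pop : List (String × Int)) : Decidable (Pre_station_popularities zip_closest_station zip_pop) := by unfold Pre_station_popularities; infer_instance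
def pvWitness_station_popularities : (List (String × String)) × (List (String × Int)) :=
  ([("z1", "s"), ("z2", "s"), ("z3", "t")], [("z1", 1), ("z2", 2), ("z3", 3)])

def Spec_station_popularities (zip_closest_station : List (String × String)) (zip_pop : List (String × Int)) (out : List String × (List (String × Int))) : Prop := out = station_popularities_alt zip_closest_station zip_pop
instance (zip_closest_station : List (String × String)) (zip_pop : List (String × Int)) (out : List String × (List (String × Int))) : Decidable (Spec_station_popularities zip_closest_station zip_pop out) := by unfold Spec_station_popularities; infer_instance

-- ===== CLAIM (what is proved, stated in full; the proofs are below) =====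
def Claim_equal_station_popularities : Prop := ∀ (zip_closest_station : List (String × String)) (zip_pop : List (String × Int)), Dom_station_popularities zip_closest_station zip_pop → Pre_station_popularities zip_closest_station zip_pop → Spec_station_popularities zip_closest_station zip_pop (station_popularities zip_closest_station zip_pop)

-- ===== LEMMAS AND PROOFS =====

-- A's fold state is (branch-free accumulated dict, its keys): the membership branch and
-- the separate unique_stations list collapse into one dict fold.
theorem sp_fold_eq (zpd : PySem.Dict String Int) :
    ∀ (l : List (String × String)) (d : PySem.Dict String Int),
    l.foldl
      (fun (acc : PySem.Dict String Int × List String) p =>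
        let station := p.2
        if acc.1.contains station = false then
          (acc.1.insert station (zpd.getD p.1 0), acc.2 ++ [station])
        else
          (acc.1.insert station (acc.1.getD station 0 + zpd.getD p.1 0), acc.2))
      (d, d.keys)
    = (l.foldl (fun (d : PySem.Dict String Int) p => d.insert p.2 (d.getD p.2 0 + zpd.getD p.1 0)) d,
       (l.foldl (fun (d : PySem.Dict String Int) p => d.insert p.2 (d.getD p.2 0 + zpd.getD p.1 0)) d).keys) := by
  intro l
  induction l with
  | nil => intro d; simp
  | cons p t ih =>
    intro d
    simp only [List.foldl_cons]
    by_cases h : d.contains p.2 = false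
    · have hd : d.insert p.2 (d.getD p.2 0 + zpd.getD p.1 0) = d.insert p.2 (zpd.getD p.1 0) := by
        rw [PySem.Dict.getD_of_not_contains d 0 h, zero_add]
      have hk := PySem.Dict.keys_insert_of_not_contains d (zpd.getD p.1 0) h
      simpa [h, hd, hk] using ih (d.insert p.2 (zpd.getD p.1 0))
    · have hc : d.contains p.2 = true := by revert h; cases d.contains p.2 <;> simp
      have hk := PySem.Dict.keys_insert_of_contains d (d.getD p.2 0 + zpd.getD p.1 0) hc
      simpa [h, hk] using ih (d.insert p.2 (d.getD p.2 0 + zpd.getD p.1 0))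

-- Each entry of the branch-free fold is the grouped sum B computes for that station.
theorem sp_getD_fold (zpd : PySem.Dict String Int) :
    ∀ (l : List (String × String)) (d : PySem.Dict String Int) (s : String),
    (l.foldl (fun (d : PySem.Dict String Int) p => d.insert p.2 (d.getD p.2 0 + zpd.getD p.1 0)) d).getD s 0
      = d.getD s 0 + ((l.filter (fun p => p.2 == s)).map (fun p => zpd.getD p.1 0)).sum := by
  intro l
  induction l with
  | nil => intro d s; simp
  | cons p t ih =>
    intro d s
    simp only [List.foldl_cons, List.filter_cons]
    rw [ih]
    by_cases hs : p.2 = s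
    · subst hs
      simp [PySem.Dict.getD_insert_self]
      try ring
    · rw [PySem.Dict.getD_insert_of_ne _ _ _ (Ne.symm hs)]
      simp [hs]

-- ===== VERDICT (by name: the statement is the Claim_ definition above) =====
theorem station_popularities_spec : Claim_equal_station_popularities := by
  intro zcs zp _ _
  unfold Spec_station_popularities station_popularities station_popularities_alt
  dsimp only
  set l := (PySem.Dict.mk zcs).items with hl
  set zpd := PySem.Dict.mk zp with hzpd
  have h := sp_fold_eq zpd l PySem.Dict.empty
  simp only [PySem.Dict.keys_empty] at h
  set D := l.foldl (fun (d : PySem.Dict String Int) p => d.insert p.2 (d.getD p.2 0 + zpd.getD p.1 0)) PySem.Dict.empty with hD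
  have hnd : D.keys.Nodup := by
    rw [hD]
    exact PySem.Dict.nodup_keys_foldl_insert_key l Prod.snd _ _ (by simp)
  have hkeys : D.keys = PySem.List.dedup (l.map Prod.snd) := by
    rw [hD, PySem.Dict.keys_foldl_insert_key]
    simp [PySem.Dict.keys_empty, PySem.Set.update_nil_left, PySem.List.dedup_eq_ofList]
  have hpairs : ((l.map (fun q => (q.2, zpd.getD q.1 0))).map Prod.fst) = l.map Prod.snd := by
    simp [List.map_map]
  have hitems : D.items = D.keys.map (fun k => (k, D.getD k 0)) :=
    PySem.Dict.items_eq_map_keys D hnd 0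
  rw [h, hitems, hkeys, hpairs]
  refine Prod.ext rfl ?_
  refine List.map_congr_left (fun s hs => ?_)
  have hsum : (((l.map (fun q => (q.2, zpd.getD q.1 0))).filter (fun t => t.1 == s)).map Prod.snd).sum
      = ((l.filter (fun p => p.2 == s)).map (fun p => zpd.getD p.1 0)).sum := by
    rw [List.filter_map, List.map_map]
    rfl
  rw [hsum]
  rw [sp_getD_fold zpd l PySem.Dict.empty s]
  simp [PySem.Dict.getD_empty]
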